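-- pv_equiv track=rewrite | github.com/marouane11119999/bachelor | CovidDataIntegrator/python/dash/helpers/files_processing.py | extract_value_labels
-- ===== SOURCE A (Python) =====
-- def extract_value_labels(lines):
--     lines = lines.splitlines()
--
--     value_labels_section = False
--     value_labels = {}
--     current_variable = None
--     first_value_label_line = False
--
--     for line in lines:
--         if 'VALUE LABELS' in line:
--             value_labels_section = True
--             first_value_label_line = True
--             continue
--
--         if value_labels_section and line.strip() == '':
--             break
--
--         if value_labels_section:
--             line = line.strip()
--
--             if line.startswith('/') or first_value_label_line:
--                 if current_variable:
--                     value_labels[current_variable.split(" ")[0]] = ' '.join(current_values)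
--
--                 if first_value_label_line:
--                     current_variable = line
--                 else:
--                     current_variable = line[1:]
--                 current_values = []
--                 first_value_label_line = False
--
--             if current_variable and line:
--                 values = line.split()
--                 current_values.extend(values)
--
--     if current_variable:
--         value_labels[current_variable.split(" ")[0]] = ' '.join(current_values)
--     return value_labels
-- ===== SOURCE B (Python) =====
-- def extract_value_labels(lines):
--     # Phase 1: collect the stripped section lines, each tagged with whether it
--     # immediately follows a 'VALUE LABELS' header line.
--     tagged = []
--     in_section = False
--     fresh = False
--     for raw in lines.splitlines():
--         if 'VALUE LABELS' in raw:
--             in_section = True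
--             fresh = True
--             continue
--         if not in_section:
--             continue
--         s = raw.strip()
--         if s == '':
--             break
--         tagged.append((s, fresh))
--         fresh = False
--     # Phase 2: split the tagged lines into (header, tokens) groups.
--     groups = []
--     current = None
--     for s, fresh in tagged:
--         if fresh or s.startswith('/'):
--             if current is not None:
--                 groups.append(current)
--             current = (s if fresh else s[1:], [])
--         if current is not None and current[0]:
--             current = (current[0], current[1] + s.split())
--     if current is not None:
--         groups.append(current)
--     # Phase 3: build the dict; later duplicate keys overwrite earlier values.
--     result = {}
--     for header, toks in groups:
--         if header:
--             result[header.split(' ')[0]] = ' '.join(toks)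
--     return result
-- ===== Notes on version B (the rewrite author's own statement) =====
-- stated objective: simpler
-- what changed: A's single stateful pass with an inline flush-on-next-group and dict writes interleaved into the scan is replaced by three plain phases: tag the stripped section lines, split them into (header, tokens) groups, then build the dict from the group list.
import Mathlib
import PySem

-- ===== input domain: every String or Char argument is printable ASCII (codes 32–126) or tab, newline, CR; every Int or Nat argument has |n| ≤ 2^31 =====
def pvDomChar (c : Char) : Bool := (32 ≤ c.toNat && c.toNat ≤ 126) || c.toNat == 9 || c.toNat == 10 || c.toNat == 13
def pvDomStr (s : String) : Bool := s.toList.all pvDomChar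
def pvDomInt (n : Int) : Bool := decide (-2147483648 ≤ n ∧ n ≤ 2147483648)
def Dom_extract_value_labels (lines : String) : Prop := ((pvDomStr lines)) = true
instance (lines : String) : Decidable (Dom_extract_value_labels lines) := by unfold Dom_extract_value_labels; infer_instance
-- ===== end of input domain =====

-- B replaces A's single stateful pass (inline flush-on-next-group dict writes) by three
-- phases — tag the section lines, split them into (header, tokens) groups, then build the
-- dict from the groups — a plainer decomposition of the same parse (objective: simpler).

-- ===== PORT A =====
-- `current_variable.split(" ")[0]` (split(" ") with a nonempty separator never yields [])
def evlKey (v : String) : String := ((PySem.Str.split? v " ").getD []).headD ""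

-- Python truthiness of `current_variable` (None or "" are falsy)
def evlTruthy : Option String → Bool
  | none => false
  | some v => v != ""

-- `if current_variable: value_labels[current_variable.split(" ")[0]] = ' '.join(current_values)`
def evlFlushA (d : PySem.Dict String String) (cv : Option String) (vals : List String) :
    PySem.Dict String String :=
  match cv with
  | none => d
  | some v => if v != "" then d.insert (evlKey v) (PySem.Str.join " " vals) else d

-- the `for line in lines:` loop; state (section, dict, current_variable, first_flag, current_values)
def evlLoopA : List String → Bool → PySem.Dict String String → Option String → Bool →
    List String → PySem.Dict String String
  | [], _, d, cv, _, vals => evlFlushA d cv vals                      -- loop ends, final flush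
  | l :: rest, sec, d, cv, first, vals =>
    if PySem.Str.isIn "VALUE LABELS" l then
      evlLoopA rest true d cv true vals
    else if sec && (PySem.Str.strip l == "") then
      evlFlushA d cv vals                                             -- break, then final flush
    else if sec then
      let s := PySem.Str.strip l
      if PySem.Str.startswith s "/" || first then
        let d' := evlFlushA d cv vals
        let cv' := if first then s else PySem.Str.slice s (some 1) none
        let vals' : List String :=
          if evlTruthy (some cv') && s != "" then PySem.Str.split₀ s else []
        evlLoopA rest sec d' (some cv') false vals'
      else
        let vals' := if evlTruthy cv && s != "" then vals ++ PySem.Str.split₀ s else vals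
        evlLoopA rest sec d cv first vals'
    else
      evlLoopA rest sec d cv first vals

def extract_value_labels (lines : String) : List (String × String) :=
  (evlLoopA (PySem.Str.splitlines lines) false PySem.Dict.empty none false []).items

-- ===== PORT B =====
-- Phase 1: the stripped section lines, tagged with the follows-a-header flag
def evlTag : List String → Bool → Bool → List (String × Bool)
  | [], _, _ => []
  | raw :: rest, insec, fresh =>
    if PySem.Str.isIn "VALUE LABELS" raw then evlTag rest true true
    else if !insec then evlTag rest insec fresh
    else
      let s := PySem.Str.strip raw
      if s == "" then []
      else (s, fresh) :: evlTag rest insec false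

-- Phase 2: split the tagged lines into (header, tokens) groups
def evlGroups : List (String × Bool) → List (String × List String) →
    Option (String × List String) → List (String × List String)
  | [], gs, cur => gs ++ cur.toList
  | (s, fresh) :: rest, gs, cur =>
    let p :=
      if fresh || PySem.Str.startswith s "/" then
        (gs ++ cur.toList,
         some ((if fresh then s else PySem.Str.slice s (some 1) none), ([] : List String)))
      else (gs, cur)
    let cur' := p.2.map (fun c => if c.1 != "" then (c.1, c.2 ++ PySem.Str.split₀ s) else c)
    evlGroups rest p.1 cur'

-- Phase 3: the dict, later duplicate keys overwriting earlier values
def evlDict (d : PySem.Dict String String) (gs : List (String × List String)) :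
    PySem.Dict String String :=
  gs.foldl (fun r g =>
    if g.1 != "" then r.insert (evlKey g.1) (PySem.Str.join " " g.2) else r) d

def extract_value_labels_alt (lines : String) : List (String × String) :=
  (evlDict PySem.Dict.empty
    (evlGroups (evlTag (PySem.Str.splitlines lines) false false) [] none)).items

-- ===== PRECONDITION & SPEC =====
def Spec_extract_value_labels (lines : String) (out : List (String × String)) : Prop := out = extract_value_labels_alt lines
instance (lines : String) (out : List (String × String)) : Decidable (Spec_extract_value_labels lines out) := by unfold Spec_extract_value_labels; infer_instance

-- ===== CLAIM (what is proved, stated in full; the proofs are below) =====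
def Claim_equal_extract_value_labels : Prop := ∀ (lines : String), Dom_extract_value_labels lines → Spec_extract_value_labels lines (extract_value_labels lines)

-- ===== LEMMAS AND PROOFS =====

-- the open group B keeps corresponds to A's (current_variable, current_values) pair
def evlOpt (cv : Option String) (vals : List String) : Option (String × List String) :=
  cv.map (fun h => (h, vals))

theorem evlGroups_acc (t : List (String × Bool)) :
    ∀ gs cur, evlGroups t gs cur = gs ++ evlGroups t [] cur := by
  induction t with
  | nil => intro gs cur; simp only [evlGroups, List.nil_append]
  | cons p rest ih =>
    intro gs cur
    obtain ⟨s, fresh⟩ := p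
    simp only [evlGroups]
    cases hb : (fresh || PySem.Str.startswith s "/") with
    | true =>
      simp only [if_true, List.nil_append]
      rw [ih, ih (cur.toList)]
      simp
    | false =>
      simp only [Bool.false_eq_true, if_false]
      exact ih gs _

theorem evlDict_append (d : PySem.Dict String String) (xs ys : List (String × List String)) :
    evlDict d (xs ++ ys) = evlDict (evlDict d xs) ys := by
  simp [evlDict]

theorem evlDict_flush (d : PySem.Dict String String) (cv : Option String) (vals : List String) :
    evlDict d (evlOpt cv vals).toList = evlFlushA d cv vals := by
  cases cv with
  | none => simp [evlOpt, evlDict, evlFlushA]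
  | some v =>
    by_cases h : v = "" <;> simp [evlOpt, evlDict, evlFlushA, h]

-- the section-mode invariant: A's running state equals B's pending phase-2 state
set_option maxHeartbeats 1000000 in
theorem evl_sec_inv (rest : List String) :
    ∀ d cv first vals,
      evlLoopA rest true d cv first vals
        = evlDict d (evlGroups (evlTag rest true first) [] (evlOpt cv vals)) := by
  induction rest with
  | nil =>
    intro d cv first vals
    simp only [evlLoopA, evlTag, evlGroups, List.nil_append, evlDict_flush]
  | cons l rest ih =>
    intro d cv first vals
    simp only [evlLoopA, evlTag]
    cases hin : PySem.Str.isIn "VALUE LABELS" l with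
    | true => simp only [if_true, ih]
    | false =>
      simp only [Bool.false_eq_true, if_false, Bool.not_true, Bool.true_and]
      cases hblank : (PySem.Str.strip l == "") with
      | true =>
        simp only [if_true, evlGroups, List.nil_append, evlDict_flush]
      | false =>
        simp only [Bool.false_eq_true, if_false, if_true]
        cases first with
        | true =>
          simp only [Bool.or_true, if_true, ih, evlGroups, Bool.true_or, List.nil_append,
            Option.map_some]
          rw [evlGroups_acc _ ((evlOpt cv vals).toList), evlDict_append, evlDict_flush]
          refine congrArg _ (congrArg _ ?_)
          by_cases hv : PySem.Str.strip l = "" <;>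
            simp [evlOpt, evlTruthy, hv]
        | false =>
          cases hstart : PySem.Str.startswith (PySem.Str.strip l) "/" with
          | true =>
            simp only [hstart, Bool.or_false, Bool.false_or, if_true, Bool.false_eq_true,
              if_false, ih, evlGroups, List.nil_append, Option.map_some]
            rw [evlGroups_acc _ ((evlOpt cv vals).toList), evlDict_append, evlDict_flush]
            refine congrArg _ (congrArg _ ?_)
            by_cases hv : PySem.Str.slice (PySem.Str.strip l) (some 1) none = "" <;>
              simp [evlOpt, evlTruthy, hv];
              · intro h; rw [h] at hblank; simp at hblank
          | false =>
            simp only [hstart, Bool.or_false, Bool.false_eq_true, if_false,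
              ih, evlGroups]
            refine congrArg _ (congrArg _ ?_)
            cases cv with
            | none => simp [evlOpt, evlTruthy]
            | some v =>
              by_cases hv : v = "" <;>
                simp [evlOpt, evlTruthy, hv];
                · intro h; rw [h] at hblank; simp at hblank

-- before the section starts, both sides just scan for the header line
theorem evl_pre_inv (rest : List String) :
    evlLoopA rest false PySem.Dict.empty none false []
      = evlDict PySem.Dict.empty (evlGroups (evlTag rest false false) [] none) := by
  induction rest with
  | nil => simp [evlLoopA, evlTag, evlGroups, evlDict, evlFlushA]
  | cons l rest ih =>
    simp only [evlLoopA, evlTag]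
    cases hin : PySem.Str.isIn "VALUE LABELS" l with
    | true =>
      simpa only [hin, if_true, evlOpt, Option.map_none] using evl_sec_inv rest _ none true []
    | false =>
      simp only [Bool.false_eq_true, if_false, Bool.false_and, Bool.not_false, if_true, ih]

-- ===== VERDICT (by name: the statement is the Claim_ definition above) =====
theorem extract_value_labels_spec : Claim_equal_extract_value_labels := by
  intro lines _
  show _ = _
  rw [extract_value_labels, extract_value_labels_alt, evl_pre_inv]
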